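-- pv_equiv track=rewrite | github.com/kranerup/literisc | rtl/modules/common/Common.py | mcSamePkt
-- ===== SOURCE A (Python) =====
-- def mcSamePkt(pkt, mask, nr_of_ports):
--     out = []
--     for port in range(nr_of_ports):
--         if (mask & (1<<port)) != 0:
--             out.append(pkt)
--         else:
--             out.append(None)
--     return out
-- ===== SOURCE B (Python) =====
-- def mcSamePkt(pkt, mask, nr_of_ports):
--     if nr_of_ports <= 0:
--         return []
--     out = [None] * nr_of_ports
--     m = mask & ((1 << nr_of_ports) - 1)
--     while m:
--         low = m & -m
--         out[low.bit_length() - 1] = pkt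
--         m &= m - 1
--     return out
-- ===== Notes on version B (the rewrite author's own statement) =====
-- stated objective: faster
-- what changed: Instead of scanning every port and testing mask & (1<<port), B preallocates [None]*nr_of_ports and iterates only over the set bits of the low-n-bit-masked mask (m & -m to extract the lowest bit, bit_length for its index, m &= m-1 to clear it), writing pkt just at those positions.
import Mathlib
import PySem

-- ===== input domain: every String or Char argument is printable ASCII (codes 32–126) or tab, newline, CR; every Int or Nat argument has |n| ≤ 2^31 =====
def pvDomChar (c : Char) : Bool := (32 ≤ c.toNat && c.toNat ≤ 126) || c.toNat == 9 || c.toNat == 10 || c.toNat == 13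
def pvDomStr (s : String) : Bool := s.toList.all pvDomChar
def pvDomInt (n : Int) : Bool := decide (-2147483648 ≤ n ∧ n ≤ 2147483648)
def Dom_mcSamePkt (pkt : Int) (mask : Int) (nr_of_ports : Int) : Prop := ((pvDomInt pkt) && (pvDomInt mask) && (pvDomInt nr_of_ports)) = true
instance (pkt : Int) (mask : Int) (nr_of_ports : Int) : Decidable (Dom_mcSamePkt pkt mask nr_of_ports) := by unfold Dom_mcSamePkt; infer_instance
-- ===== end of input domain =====

-- B replaces A's per-port scan (testing mask & (1<<port) for every port) by preallocating
-- [None]*n and writing pkt only at the set-bit positions of the low-n-bit-masked mask,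
-- extracted with m & -m / bit_length / m &= m-1 (objective: faster, measured).

-- ===== PORT A =====
def mcSamePkt (pkt : Int) (mask : Int) (nr_of_ports : Int) : List (Option Int) :=
  (PySem.List.pyRange 0 nr_of_ports).foldl
    (fun out port =>
      if PySem.Int.band mask (1 <<< port.toNat) ≠ 0 then out ++ [some pkt]
      else out ++ [none]) []

-- ===== PORT B =====
-- The while loop of Source B; its `while m:` is written `0 < m` (a totality guard: the loop
-- is only ever entered with 0 ≤ m, where the two tests coincide).  The list write
-- out[low.bit_length()-1] = pkt is List.set (the index is always in range in Source B).
def mcLoopB (pkt : Int) (out : List (Option Int)) (m : Int) : List (Option Int) :=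
  if h : 0 < m then
    mcLoopB pkt
      (out.set (PySem.Int.bitLength (PySem.Int.band m (-m)) - 1) (some pkt))
      (PySem.Int.band m (m - 1))
  else out
termination_by m.toNat
decreasing_by
  have h1 : PySem.Int.band m (m - 1) = ((m.toNat &&& (m - 1).toNat : Nat) : Int) :=
    PySem.Int.band_of_nonneg (by omega) (by omega)
  have h2 : m.toNat &&& (m - 1).toNat ≤ (m - 1).toNat := Nat.and_le_right
  rw [h1]
  omega

def mcSamePkt_alt (pkt : Int) (mask : Int) (nr_of_ports : Int) : List (Option Int) :=
  if nr_of_ports ≤ 0 then []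
  else
    mcLoopB pkt (List.replicate nr_of_ports.toNat none)
      (PySem.Int.band mask ((1 <<< nr_of_ports.toNat) - 1))

-- ===== PRECONDITION & SPEC =====
def Spec_mcSamePkt (pkt : Int) (mask : Int) (nr_of_ports : Int) (out : List (Option Int)) : Prop := out = mcSamePkt_alt pkt mask nr_of_ports
instance (pkt : Int) (mask : Int) (nr_of_ports : Int) (out : List (Option Int)) : Decidable (Spec_mcSamePkt pkt mask nr_of_ports out) := by unfold Spec_mcSamePkt; infer_instance

-- ===== CLAIM (what is proved, stated in full; the proofs are below) =====
def Claim_equal_mcSamePkt : Prop := ∀ (pkt : Int) (mask : Int) (nr_of_ports : Int), Dom_mcSamePkt pkt mask nr_of_ports → Spec_mcSamePkt pkt mask nr_of_ports (mcSamePkt pkt mask nr_of_ports)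

-- ===== LEMMAS AND PROOFS =====

-- M odd: clearing nothing above bit 0, M &&& (M-1) = M - 1
theorem pv_and_pred_odd (M : Nat) (h : M % 2 = 1) : M &&& (M - 1) = M - 1 := by
  apply Nat.eq_of_testBit_eq
  intro i
  cases i with
  | zero =>
      simp only [Nat.testBit_zero]
      have : (M - 1) % 2 = 0 := by omega
      simp [this]
  | succ p =>
      rw [Nat.testBit_and, Nat.testBit_add_one, Nat.testBit_add_one]
      have : (M - 1) / 2 = M / 2 := by omega
      rw [this, Bool.and_self]

-- M even: the clear-lowest-bit step happens in the upper half
theorem pv_and_pred_even (M : Nat) (h0 : 0 < M) (h : M % 2 = 0) :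
    M &&& (M - 1) = 2 * (M / 2 &&& (M / 2 - 1)) := by
  apply Nat.eq_of_testBit_eq
  intro i
  cases i with
  | zero =>
      simp only [Nat.testBit_zero]
      have h1 : M % 2 = 0 := h
      have h2 : (2 * (M / 2 &&& (M / 2 - 1))) % 2 = 0 := by omega
      simp [h1, h2]
  | succ p =>
      rw [Nat.testBit_and, Nat.testBit_add_one, Nat.testBit_add_one, Nat.testBit_add_one]
      have e1 : (M - 1) / 2 = M / 2 - 1 := by omega
      have e2 : 2 * (M / 2 &&& (M / 2 - 1)) / 2 = M / 2 &&& (M / 2 - 1) := by omega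
      rw [e1, e2, Nat.testBit_and]

-- the Source B loop step: m & -m is 2^k (k the lowest set bit) and m &= m-1 clears exactly bit k
theorem pv_clearLow (M : Nat) (h : 0 < M) :
    ∃ k, M.testBit k = true ∧ M - (M &&& (M - 1)) = 2 ^ k ∧
      ∀ p, (M &&& (M - 1)).testBit p = (M.testBit p && decide (p ≠ k)) := by
  induction M using Nat.strong_induction_on with
  | _ M ih =>
    rcases Nat.mod_two_eq_zero_or_one M with he | ho
    · have h2 : 0 < M / 2 := by omega
      obtain ⟨k, hk1, hk2, hk3⟩ := ih (M / 2) (by omega) h2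
      have hle : M / 2 &&& (M / 2 - 1) ≤ M / 2 := Nat.and_le_left
      refine ⟨k + 1, ?_, ?_, ?_⟩
      · rw [Nat.testBit_add_one]; exact hk1
      · rw [pv_and_pred_even M h he]
        have e : M - 2 * (M / 2 &&& (M / 2 - 1)) = 2 * (M / 2 - (M / 2 &&& (M / 2 - 1))) := by
          omega
        rw [e, hk2]; ring
      · intro p
        rw [pv_and_pred_even M h he]
        cases p with
        | zero =>
            have h1 : (2 * (M / 2 &&& (M / 2 - 1))) % 2 = 0 := by omega
            simp [Nat.testBit_zero, h1, he]
        | succ q =>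
            rw [Nat.testBit_add_one, Nat.testBit_add_one]
            have e2 : 2 * (M / 2 &&& (M / 2 - 1)) / 2 = M / 2 &&& (M / 2 - 1) := by omega
            rw [e2, hk3 q]
            have : (decide (q ≠ k)) = (decide (q + 1 ≠ k + 1)) := by simp
            rw [this]
    · refine ⟨0, ?_, ?_, ?_⟩
      · simp [Nat.testBit_zero, ho]
      · rw [pv_and_pred_odd M ho]
        have : M - (M - 1) = 1 := by omega
        rw [this]; rfl
      · intro p
        rw [pv_and_pred_odd M ho]
        cases p with
        | zero =>
            have : (M - 1) % 2 = 0 := by omega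
            simp [Nat.testBit_zero, this]
        | succ q =>
            rw [Nat.testBit_add_one, Nat.testBit_add_one]
            have : (M - 1) / 2 = M / 2 := by omega
            rw [this]
            simp

-- halving decomposition of Nat.and
theorem pv_and_half (A W : Nat) : A &&& W = 2 * (A / 2 &&& (W / 2)) + (A % 2) * (W % 2) := by
  apply Nat.eq_of_testBit_eq
  intro i
  cases i with
  | zero =>
      simp only [Nat.testBit_zero]
      rcases Nat.mod_two_eq_zero_or_one A with hA | hA <;>
        rcases Nat.mod_two_eq_zero_or_one W with hW | hW <;>
          · rw [hA, hW]
            have : (2 * (A / 2 &&& (W / 2)) + A % 2 * (W % 2)) % 2 = A % 2 * (W % 2) % 2 := by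
              omega
            simp [hA, hW]
  | succ p =>
      rw [Nat.testBit_and, Nat.testBit_add_one, Nat.testBit_add_one, Nat.testBit_add_one]
      have hlt : A % 2 * (W % 2) < 2 := by
        rcases Nat.mod_two_eq_zero_or_one A with hA | hA <;> rw [hA] <;> omega
      have e : (2 * (A / 2 &&& (W / 2)) + A % 2 * (W % 2)) / 2 = A / 2 &&& (W / 2) := by
        omega
      rw [e, Nat.testBit_and]

-- subtracting the overlap A &&& W from A clears in A exactly the bits of W
theorem pv_sub_and_testBit (A : Nat) : ∀ (W p : Nat),
    (A - (A &&& W)).testBit p = (A.testBit p && !(W.testBit p)) := by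
  induction A using Nat.strong_induction_on with
  | _ A ih =>
    intro W p
    rcases Nat.eq_zero_or_pos A with hA | hA
    · subst hA; simp
    · have hd : A &&& W = 2 * (A / 2 &&& (W / 2)) + (A % 2) * (W % 2) := pv_and_half A W
      have hle : A / 2 &&& (W / 2) ≤ A / 2 := Nat.and_le_left
      have e : A - (A &&& W) = 2 * (A / 2 - (A / 2 &&& (W / 2))) + (A % 2 - (A % 2) * (W % 2)) := by
        rcases Nat.mod_two_eq_zero_or_one A with h | h <;>
          rcases Nat.mod_two_eq_zero_or_one W with h' | h' <;>
            (rw [h, h'] at hd ⊢; norm_num at hd ⊢; omega)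
      cases p with
      | zero =>
          rw [e]
          simp only [Nat.testBit_zero]
          rcases Nat.mod_two_eq_zero_or_one A with h | h <;>
            rcases Nat.mod_two_eq_zero_or_one W with h' | h' <;>
              · rw [h, h'] at *
                have : (2 * (A / 2 - (A / 2 &&& (W / 2))) + (A % 2 - A % 2 * (W % 2))) % 2
                    = (A % 2 - A % 2 * (W % 2)) % 2 := by omega
                simp
      | succ q =>
          rw [e, Nat.testBit_add_one, Nat.testBit_add_one, Nat.testBit_add_one]
          have hsm : A % 2 - (A % 2) * (W % 2) < 2 := by omega
          have e2 : (2 * (A / 2 - (A / 2 &&& (W / 2))) + (A % 2 - A % 2 * (W % 2))) / 2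
              = A / 2 - (A / 2 &&& (W / 2)) := by omega
          rw [e2]
          exact ih (A / 2) (by omega) (W / 2) q

-- bit_length of a power of two
theorem pv_bitLength_two_pow (k : Nat) : PySem.Int.bitLength ((2 ^ k : Nat) : Int) = k + 1 := by
  induction k with
  | zero =>
      rw [PySem.Int.bitLength_natCast (by norm_num)]
      norm_num [PySem.Int.bitLength_zero]
  | succ q ih =>
      rw [PySem.Int.bitLength_natCast (by positivity)]
      have : 2 ^ (q + 1) / 2 = 2 ^ q := by
        rw [pow_succ]; omega
      rw [this, ih]

-- the loop invariant: mcLoopB writes pkt exactly at the set bits of m, elsewhere keeps out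
theorem pv_mcLoopB_spec (pkt : Int) (M : Nat) : ∀ (m : Int), m.toNat = M → 0 ≤ m →
    ∀ (out : List (Option Int)),
      (mcLoopB pkt out m).length = out.length ∧
      ∀ p, p < out.length →
        (mcLoopB pkt out m)[p]? = if M.testBit p then some (some pkt) else out[p]? := by
  induction M using Nat.strong_induction_on with
  | _ M ih =>
    intro m hM hm out
    by_cases hpos : 0 < m
    · obtain ⟨k, hk1, hk2, hk3⟩ := pv_clearLow M (by omega)
      -- the extracted lowest bit: m & -m = 2^k
      have hlow : PySem.Int.band m (-m) = ((2 ^ k : Nat) : Int) := by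
        have hnb : ¬ (0 ≤ -m) := by omega
        unfold PySem.Int.band
        rw [if_pos (by omega), if_neg hnb]
        have e1 : (-(-m) - 1).toNat = M - 1 := by omega
        rw [e1, hM, hk2]
      -- the cleared mask: m & (m-1)
      have hclr : PySem.Int.band m (m - 1) = ((M &&& (M - 1) : Nat) : Int) := by
        rw [PySem.Int.band_of_nonneg (by omega) (by omega)]
        have : (m - 1).toNat = M - 1 := by omega
        rw [this, hM]
      have hrec := ih (M &&& (M - 1))
        (by have := Nat.and_le_right (n := M) (m := M - 1); omega)
        ((M &&& (M - 1) : Nat) : Int) (by simp) (by positivity)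
        (out.set k (some pkt))
      rw [mcLoopB, dif_pos hpos, hlow, hclr, pv_bitLength_two_pow, Nat.add_sub_cancel]
      obtain ⟨hlen, helt⟩ := hrec
      refine ⟨by rw [hlen]; simp, ?_⟩
      intro p hp
      rw [helt p (by simpa using hp), hk3 p, List.getElem?_set]
      by_cases hpk : p = k
      · subst hpk
        simp [hp, hk1]
      · simp [Ne.symm hpk, hpk]
    · have hM0 : M = 0 := by omega
      rw [mcLoopB, dif_neg hpos]
      subst hM0
      simp

-- pyRange 0 n with step 1 is just List.range
theorem pv_pyRange_zero (n : Int) :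
    PySem.List.pyRange 0 n = (List.range n.toNat).map Int.ofNat := by
  unfold PySem.List.pyRange
  simp only [if_neg (by norm_num : ¬ (1:Int) = 0), if_pos (by norm_num : (0:Int) < 1)]
  by_cases h : 0 < n
  · rw [if_pos h]
    have e : ((n - 0 + 1 - 1) / 1).toNat = n.toNat := by omega
    rw [e]
    apply List.map_congr_left
    intro k _
    show (0 : Int) + 1 * (k : Int) = Int.ofNat k
    simp [Int.ofNat_eq_natCast]
  · rw [if_neg h]
    have : n.toNat = 0 := by omega
    simp [this]

theorem pv_map_eq_flatMap {α β : Type} (f : α → β) (l : List α) :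
    List.flatMap (fun x => [f x]) l = l.map f := by
  induction l with
  | nil => rfl
  | cons a t ih => simp [List.flatMap_cons, ih]

-- port A is the per-port bit-test map
theorem pv_mcSamePkt_eq_map (pkt mask n : Int) :
    mcSamePkt pkt mask n = (List.range n.toNat).map
      (fun p => if PySem.Int.band mask ((1 <<< p : Nat) : Int) ≠ 0 then some pkt else none) := by
  unfold mcSamePkt
  rw [pv_pyRange_zero, List.foldl_map]
  have hfn : (fun (out : List (Option Int)) (k : Nat) =>
      if PySem.Int.band mask (1 <<< (Int.ofNat k).toNat) ≠ 0 then out ++ [some pkt] else out ++ [none])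
      = fun out k => out ++ [if PySem.Int.band mask ((1 <<< k : Nat) : Int) ≠ 0 then some pkt else none] := by
    funext out k
    have : (Int.ofNat k).toNat = k := rfl
    rw [this]
    split <;> rfl
  rw [hfn, PySem.List.foldl_append_eq_flatMap
    (fun k => [if PySem.Int.band mask ((1 <<< k : Nat) : Int) ≠ 0 then some pkt else none])]
  rw [pv_map_eq_flatMap]
  rfl

-- the per-port test of A agrees with the bits of B's masked value
theorem pv_test_iff (mask : Int) (N p : Nat) (hp : p < N) :
    (PySem.Int.band mask (((1 <<< N : Nat) : Int) - 1)).toNat.testBit p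
      = decide (PySem.Int.band mask ((1 <<< p : Nat) : Int) ≠ 0) := by
  have hN : ((1 <<< N : Nat) : Int) - 1 = ((2 ^ N - 1 : Nat) : Int) := by
    rw [Nat.one_shiftLeft]
    have h1 : (1:Nat) ≤ 2 ^ N := Nat.one_le_two_pow
    push_cast [h1]
    ring
  have hp2 : (1 <<< p : Nat) = 2 ^ p := Nat.one_shiftLeft p
  rw [hN, hp2]
  by_cases hm : 0 ≤ mask
  · rw [PySem.Int.band_of_nonneg hm (by positivity),
        PySem.Int.band_of_nonneg hm (by positivity)]
    simp only [Int.toNat_natCast]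
    rw [Nat.testBit_and, Nat.testBit_two_pow_sub_one]
    have hand := Nat.and_two_pow mask.toNat p
    have hne : (2 : Nat) ^ p ≠ 0 := (Nat.two_pow_pos p).ne'
    cases h : mask.toNat.testBit p with
    | false => simp [hp, hand, h]
    | true => simp [hp, hand, h]
  · have hb : (0:Int) ≤ ((2 ^ N - 1 : Nat) : Int) := by positivity
    have hb2 : (0:Int) ≤ ((2 ^ p : Nat) : Int) := by positivity
    have hA : PySem.Int.band mask ((2 ^ N - 1 : Nat) : Int)
        = (((2 ^ N - 1) - ((2 ^ N - 1) &&& (-mask - 1).toNat) : Nat) : Int) := by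
      unfold PySem.Int.band
      rw [if_neg hm, if_pos hb, Int.toNat_natCast]
    have hB : PySem.Int.band mask ((2 ^ p : Nat) : Int)
        = ((2 ^ p - (2 ^ p &&& (-mask - 1).toNat) : Nat) : Int) := by
      unfold PySem.Int.band
      rw [if_neg hm, if_pos hb2, Int.toNat_natCast]
    rw [hA, hB, Int.toNat_natCast]
    rw [pv_sub_and_testBit, Nat.testBit_two_pow_sub_one]
    have hand : 2 ^ p &&& (-mask - 1).toNat
        = 2 ^ p * (((-mask - 1).toNat.testBit p).toNat) := Nat.two_pow_and _ p
    have hne : (2 : Nat) ^ p ≠ 0 := (Nat.two_pow_pos p).ne'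
    cases h : (-mask - 1).toNat.testBit p with
    | true =>
        have e : 2 ^ p - (2 ^ p &&& (-mask - 1).toNat) = 0 := by rw [hand, h]; simp
        rw [e]; simp [hp]
    | false =>
        have e : 2 ^ p - (2 ^ p &&& (-mask - 1).toNat) = 2 ^ p := by rw [hand, h]; simp
        rw [e]; simp [hp]

-- ===== VERDICT (by name: the statement is the Claim_ definition above) =====
theorem mcSamePkt_spec : Claim_equal_mcSamePkt := by
  intro pkt mask n _
  unfold Spec_mcSamePkt mcSamePkt_alt
  by_cases hn : n ≤ 0
  · rw [if_pos hn, pv_mcSamePkt_eq_map]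
    have : n.toNat = 0 := by omega
    simp [this]
  · rw [if_neg hn]
    have hm0 : 0 ≤ PySem.Int.band mask (((1 <<< n.toNat : Nat) : Int) - 1) := by
      rw [PySem.Int.band_comm]
      have h1 : (1:Nat) ≤ 1 <<< n.toNat := by
        rw [Nat.one_shiftLeft]; exact Nat.one_le_two_pow
      exact PySem.Int.band_nonneg_of_nonneg_left mask (by omega)
    obtain ⟨hlen, helt⟩ := pv_mcLoopB_spec pkt
      (PySem.Int.band mask (((1 <<< n.toNat : Nat) : Int) - 1)).toNat
      (PySem.Int.band mask (((1 <<< n.toNat : Nat) : Int) - 1)) rfl hm0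
      (List.replicate n.toNat none)
    rw [pv_mcSamePkt_eq_map]
    apply List.ext_getElem?
    intro i
    by_cases hi : i < n.toNat
    · rw [List.getElem?_map, List.getElem?_range hi,
          helt i (by simpa using hi), pv_test_iff mask n.toNat i hi]
      rw [List.getElem?_replicate, if_pos hi]
      cases h : decide (PySem.Int.band mask ((1 <<< i : Nat) : Int) ≠ 0) <;>
        simp_all
    · rw [List.getElem?_eq_none (by simpa using hi), List.getElem?_eq_none]
      rw [hlen]
      simpa using hi
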